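-- pv_equiv track=rewrite | github.com/seifreed/r2inspect | scripts/governance_gates.py | _ordered_failure_groups
-- ===== SOURCE A (Python) =====
-- def _ordered_failure_groups(
--     failure_groups: dict[str, list[dict[str, str]]]
-- ) -> dict[str, list[dict[str, str]]]:
--     order = ("missing_file", "invalid_status", "malformed_sections", "stale_audit")
--     ordered: dict[str, list[dict[str, str]]] = {}
--     for key in order:
--         if key in failure_groups:
--             ordered[key] = failure_groups[key]
--     for key in sorted(failure_groups):
--         if key not in ordered:
--             ordered[key] = failure_groups[key]
--     return ordered
-- ===== SOURCE B (Python) =====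
-- def _ordered_failure_groups(
--     failure_groups: dict[str, list[dict[str, str]]]
-- ) -> dict[str, list[dict[str, str]]]:
--     order = ("missing_file", "invalid_status", "malformed_sections", "stale_audit")
--     rank = {key: position for position, key in enumerate(order)}
--     keys = sorted(failure_groups, key=lambda key: (rank.get(key, len(order)), key))
--     return {key: failure_groups[key] for key in keys}
-- ===== Notes on version B (the rewrite author's own statement) =====
-- stated objective: idiomatic
-- what changed: A builds the result in two separate phases (an explicit loop over the fixed priority tuple, then a second loop over the sorted remaining keys with a membership test); B computes one composite sort key (rank from an enumerate-built dict, else len(order), tie-broken by the key string), sorts all keys once, and builds the dict in a single comprehension.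
import Mathlib
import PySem

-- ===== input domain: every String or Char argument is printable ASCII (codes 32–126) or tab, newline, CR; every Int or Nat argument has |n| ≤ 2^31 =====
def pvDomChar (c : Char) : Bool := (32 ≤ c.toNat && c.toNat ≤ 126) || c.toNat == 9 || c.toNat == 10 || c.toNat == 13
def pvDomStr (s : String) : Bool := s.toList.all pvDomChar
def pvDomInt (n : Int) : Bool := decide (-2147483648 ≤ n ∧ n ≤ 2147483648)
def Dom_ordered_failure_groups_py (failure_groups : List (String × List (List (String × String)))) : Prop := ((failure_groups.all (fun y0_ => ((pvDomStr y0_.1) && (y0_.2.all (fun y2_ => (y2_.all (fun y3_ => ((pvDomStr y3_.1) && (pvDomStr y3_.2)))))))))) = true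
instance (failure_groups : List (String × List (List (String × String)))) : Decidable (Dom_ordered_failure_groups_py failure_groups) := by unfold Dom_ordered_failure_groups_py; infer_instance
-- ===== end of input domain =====

-- B: one composite-key sort (priority rank, then key) and a single dict-building pass,
-- instead of A's two phases (priority loop, then sorted-remainder loop); same cost, more idiomatic.


-- ===== PORT A =====
def ordered_failure_groups_py (failure_groups : List (String × List (List (String × String)))) : List (String × List (List (String × String))) :=
  let fgd : PySem.Dict String (List (List (String × String))) := PySem.Dict.mk failure_groups
  let order : List String := ["missing_file", "invalid_status", "malformed_sections", "stale_audit"]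
  let ordered : PySem.Dict String (List (List (String × String))) :=
    order.foldl (fun ordered key =>
      if fgd.contains key then
        -- failure_groups[key]: the key is present (branch condition), so getD's default is unreachable
        ordered.insert key (fgd.getD key [])
      else ordered) PySem.Dict.empty
  let ordered :=
    (PySem.List.sorted fgd.keys (fun k => k) false).foldl (fun ordered key =>
      if ordered.contains key then ordered
      -- failure_groups[key]: the key is drawn from the dict itself, so getD's default is unreachable
      else ordered.insert key (fgd.getD key [])) ordered
  ordered.items

-- ===== PORT B =====
def ordered_failure_groups_py_alt (failure_groups : List (String × List (List (String × String)))) : List (String × List (List (String × String))) :=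
  let fgd : PySem.Dict String (List (List (String × String))) := PySem.Dict.mk failure_groups
  let order : List String := ["missing_file", "invalid_status", "malformed_sections", "stale_audit"]
  let rank : PySem.Dict String Int :=
    (PySem.List.enumerate order 0).foldl (fun d p => d.insert p.2 p.1) PySem.Dict.empty
  let keys : List String :=
    PySem.List.sorted2 fgd.keys (fun key => rank.getD key (order.length : Int)) (fun key => key) false
  -- {key: failure_groups[key] for key in keys}: every key is drawn from the dict, so getD's default is unreachable
  (keys.foldl (fun d key => d.insert key (fgd.getD key [])) PySem.Dict.empty).items

-- ===== PRECONDITION & SPEC =====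
-- The association list encodes a Python dict, whose keys are necessarily distinct; Pre_ excludes
-- only duplicate-key lists, which correspond to no Python input of A.
def Pre_ordered_failure_groups_py (failure_groups : List (String × List (List (String × String)))) : Prop :=
  (failure_groups.map Prod.fst).Nodup
instance (failure_groups : List (String × List (List (String × String)))) : Decidable (Pre_ordered_failure_groups_py failure_groups) := by unfold Pre_ordered_failure_groups_py; infer_instance
def pvWitness_ordered_failure_groups_py : (List (String × List (List (String × String)))) :=
  [("stale_audit", [[("path", "a.md")]]), ("missing_file", []), ("alpha", [[("x", "y")]])]
def Spec_ordered_failure_groups_py (failure_groups : List (String × List (List (String × String)))) (out : List (String × List (List (String × String)))) : Prop := out = ordered_failure_groups_py_alt failure_groups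
instance (failure_groups : List (String × List (List (String × String)))) (out : List (String × List (List (String × String)))) : Decidable (Spec_ordered_failure_groups_py failure_groups out) := by unfold Spec_ordered_failure_groups_py; infer_instance

-- ===== CLAIM (what is proved, stated in full; the proofs are below) =====
def Claim_equal_ordered_failure_groups_py : Prop := ∀ (failure_groups : List (String × List (List (String × String)))), Dom_ordered_failure_groups_py failure_groups → Pre_ordered_failure_groups_py failure_groups → Spec_ordered_failure_groups_py failure_groups (ordered_failure_groups_py failure_groups)

-- ===== LEMMAS AND PROOFS =====

-- Proof-only abbreviations.
def pvOrder : List String := ["missing_file", "invalid_status", "malformed_sections", "stale_audit"]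

def pvRankD : PySem.Dict String Int :=
  (PySem.List.enumerate pvOrder 0).foldl (fun d p => d.insert p.2 p.1) PySem.Dict.empty

def pvRnk (k : String) : Int := pvRankD.getD k (pvOrder.length : Int)

def pvBef (a b : String) : Bool :=
  decide (pvRnk a < pvRnk b) || (!decide (pvRnk b < pvRnk a) && decide (a < b))

lemma pvRankD_eq : pvRankD = PySem.Dict.mk
    [("missing_file", 0), ("invalid_status", 1), ("malformed_sections", 2), ("stale_audit", 3)] := by
  decide

lemma pvRnk_of_not_mem {k : String} (h : k ∉ pvOrder) : pvRnk k = 4 := by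
  simp only [pvOrder, List.mem_cons, List.not_mem_nil, or_false, not_or] at h
  obtain ⟨h1, h2, h3, h4⟩ := h
  simp [pvRnk, pvRankD_eq, PySem.Dict.getD_eq_get?_getD, PySem.Dict.get?_mk_cons,
    Ne.symm h1, Ne.symm h2, Ne.symm h3, Ne.symm h4, pvOrder]
  rfl

lemma pvRnk_lt_of_mem {k : String} (h : k ∈ pvOrder) : pvRnk k < 4 := by
  simp only [pvOrder, List.mem_cons, List.not_mem_nil, or_false] at h
  rcases h with h | h | h | h <;> subst h <;> decide

lemma pvBef_asymm {a b : String} (h : pvBef a b = true) : pvBef b a = false := by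
  simp only [pvBef, Bool.or_eq_true, Bool.and_eq_true, Bool.not_eq_true',
    decide_eq_true_eq, decide_eq_false_iff_not, Bool.or_eq_false_iff,
    Bool.and_eq_false_iff, Bool.not_eq_false'] at h ⊢
  rcases h with h | ⟨h1, h2⟩
  · exact ⟨by omega, Or.inl (by omega)⟩
  · exact ⟨by omega, Or.inr (lt_asymm h2)⟩

lemma pvBef_flip_trans {a b c : String} (h1 : pvBef c b = false) (h2 : pvBef b a = false) :
    pvBef c a = false := by
  simp only [pvBef, Bool.or_eq_false_iff, Bool.and_eq_false_iff, Bool.not_eq_false',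
    decide_eq_true_eq, decide_eq_false_iff_not] at h1 h2 ⊢
  obtain ⟨hc1, hc2⟩ := h1
  obtain ⟨hb1, hb2⟩ := h2
  refine ⟨by omega, ?_⟩
  rcases hc2 with h | h
  · left; omega
  · rcases hb2 with h' | h'
    · left; omega
    · right; intro hca
      rcases lt_trichotomy c b with hcb | hcb | hcb
      · exact h hcb
      · exact h' (hcb ▸ hca)
      · exact h' (lt_trans hcb hca)

lemma pvBef_total {a b : String} (h1 : pvBef a b = false) (h2 : pvBef b a = false) : a = b := by
  simp only [pvBef, Bool.or_eq_false_iff, Bool.and_eq_false_iff, Bool.not_eq_false',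
    decide_eq_true_eq, decide_eq_false_iff_not] at h1 h2
  obtain ⟨ha1, ha2⟩ := h1
  obtain ⟨hb1, hb2⟩ := h2
  rcases ha2 with h | h
  · omega
  · rcases hb2 with h' | h'
    · omega
    · exact le_antisymm (not_lt.1 h') (not_lt.1 h)

-- insertion into a pairwise-admissible list keeps it pairwise-admissible
lemma pvPairwise_insertBy (x : String) :
    ∀ (l : List String), l.Pairwise (fun a b => pvBef b a = false) →
      (PySem.List.insertBy pvBef x l).Pairwise (fun a b => pvBef b a = false) := by
  intro l
  induction l with
  | nil => intro _; simp [PySem.List.insertBy]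
  | cons y ys ih =>
    intro h
    rw [List.pairwise_cons] at h
    obtain ⟨hy, hys⟩ := h
    show (if pvBef x y then x :: y :: ys else y :: PySem.List.insertBy pvBef x ys).Pairwise _
    by_cases hxy : pvBef x y = true
    · simp only [hxy, if_true]
      refine List.Pairwise.cons ?_ (List.Pairwise.cons hy hys)
      intro z hz
      rcases List.mem_cons.1 hz with rfl | hz
      · exact pvBef_asymm hxy
      · exact pvBef_flip_trans (hy z hz) (pvBef_asymm hxy)
    · simp only [hxy, Bool.false_eq_true, if_false]
      refine List.Pairwise.cons ?_ (ih hys)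
      intro z hz
      rcases (PySem.List.mem_insertBy pvBef x z ys).1 hz with rfl | hz
      · exact Bool.eq_false_iff.2 hxy
      · exact hy z hz

lemma pvPairwise_foldl_insertBy :
    ∀ (xs acc : List String), acc.Pairwise (fun a b => pvBef b a = false) →
      (xs.foldl (fun acc x => PySem.List.insertBy pvBef x acc) acc).Pairwise
        (fun a b => pvBef b a = false) := by
  intro xs
  induction xs with
  | nil => intro acc h; exact h
  | cons x t ih => intro acc h; exact ih _ (pvPairwise_insertBy x acc h)

-- B's composite-key sort output is the unique admissible rearrangement
lemma pvSorted2_eq (xs ys : List String) (hperm : ys.Perm xs)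
    (hpw : ys.Pairwise (fun a b => pvBef b a = false)) :
    PySem.List.sorted2 xs (fun k => pvRnk k) (fun k => k) false = ys := by
  have hdef : PySem.List.sorted2 xs (fun k => pvRnk k) (fun k => k) false
      = xs.foldl (fun acc x => PySem.List.insertBy pvBef x acc) [] := rfl
  have hp : (PySem.List.sorted2 xs (fun k => pvRnk k) (fun k => k) false).Perm xs :=
    PySem.List.sorted2_perm xs _ _ false
  have hpw2 : (PySem.List.sorted2 xs (fun k => pvRnk k) (fun k => k) false).Pairwise
      (fun a b => pvBef b a = false) := by
    rw [hdef]; exact pvPairwise_foldl_insertBy xs [] List.Pairwise.nil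
  refine List.eq_of_perm_of_sorted ?_ hpw2 hpw (hp.trans hperm.symm)
  intro a b _ _ h1 h2
  exact pvBef_total h2 h1

-- A's phase 1: the loop over the priority tuple appends exactly the present priority keys
lemma pvFoldl_cond_insert_items {ν : Type} (fgd : PySem.Dict String ν) (dflt : ν) :
    ∀ (os : List String) (d : PySem.Dict String ν), os.Nodup →
      (∀ k ∈ os, d.contains k = false) →
      (os.foldl (fun acc key => if fgd.contains key then acc.insert key (fgd.getD key dflt)
        else acc) d).items
      = d.items ++ (os.filter (fun k => fgd.contains k)).map (fun k => (k, fgd.getD k dflt)) := by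
  intro os
  induction os with
  | nil => intro d _ _; simp
  | cons k t ih =>
    intro d hnd hfresh
    have hk : d.contains k = false := hfresh k (List.mem_cons_self ..)
    have hnd' : t.Nodup := (List.nodup_cons.1 hnd).2
    have hknt : k ∉ t := (List.nodup_cons.1 hnd).1
    by_cases hc : fgd.contains k = true
    · simp only [List.foldl_cons, hc, if_true, List.filter_cons, List.map_cons]
      rw [ih (d.insert k (fgd.getD k dflt)) hnd' ?_]
      · rw [PySem.Dict.items_insert_of_not_contains _ _ hk]
        simp
      · intro k' hk'
        rw [PySem.Dict.contains_insert]
        have hne : k' ≠ k := fun h => hknt (h ▸ hk')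
        simp [hne, hfresh k' (List.mem_cons_of_mem _ hk')]
    · have hc' : fgd.contains k = false := Bool.eq_false_iff.2 hc
      simp only [List.foldl_cons, hc', Bool.false_eq_true, if_false, List.filter_cons]
      rw [ih d hnd' (fun k' hk' => hfresh k' (List.mem_cons_of_mem _ hk'))]

-- A's phase 2: the guarded loop appends exactly the not-yet-present keys, in order
lemma pvFoldl_guard_insert_items {ν : Type} (fgd : PySem.Dict String ν) (dflt : ν) :
    ∀ (ks : List String) (d : PySem.Dict String ν), ks.Nodup →
      (ks.foldl (fun acc key => if acc.contains key then acc
        else acc.insert key (fgd.getD key dflt)) d).items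
      = d.items ++ (ks.filter (fun k => !(d.contains k))).map (fun k => (k, fgd.getD k dflt)) := by
  intro ks
  induction ks with
  | nil => intro d _; simp
  | cons k t ih =>
    intro d hnd
    have hnd' : t.Nodup := (List.nodup_cons.1 hnd).2
    have hknt : k ∉ t := (List.nodup_cons.1 hnd).1
    by_cases hc : d.contains k = true
    · simp only [List.foldl_cons, hc, if_true, List.filter_cons, Bool.not_true]
      rw [ih d hnd']
      simp
    · have hc' : d.contains k = false := Bool.eq_false_iff.2 hc
      simp only [List.foldl_cons, hc', Bool.false_eq_true, if_false, List.filter_cons,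
        Bool.not_false]
      rw [ih (d.insert k (fgd.getD k dflt)) hnd']
      rw [PySem.Dict.items_insert_of_not_contains _ _ hc']
      have hfilt : t.filter (fun k' => !((d.insert k (fgd.getD k dflt)).contains k'))
          = t.filter (fun k' => !(d.contains k')) := by
        apply List.filter_congr
        intro k' hk'
        rw [PySem.Dict.contains_insert]
        have hne : k' ≠ k := fun h => hknt (h ▸ hk')
        simp [hne]
      rw [hfilt]
      simp

-- the key-sequence identity: B's single composite sort = A's priority prefix ++ sorted rest
lemma pvCore (fg : List (String × List (List (String × String))))
    (hpre : (fg.map Prod.fst).Nodup) :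
    PySem.List.sorted2 (PySem.Dict.mk fg :
        PySem.Dict String (List (List (String × String)))).keys
      (fun k => pvRnk k) (fun k => k) false
    = (pvOrder.filter (fun k => (PySem.Dict.mk fg :
          PySem.Dict String (List (List (String × String)))).contains k))
      ++ (PySem.List.sorted (PySem.Dict.mk fg :
            PySem.Dict String (List (List (String × String)))).keys (fun k => k) false).filter
          (fun k => !decide (k ∈ pvOrder.filter (fun k => (PySem.Dict.mk fg :
              PySem.Dict String (List (List (String × String)))).contains k))) := by
  have hkeysnd : (PySem.Dict.mk fg :
      PySem.Dict String (List (List (String × String)))).keys.Nodup := hpre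
  set fgd : PySem.Dict String (List (List (String × String))) := PySem.Dict.mk fg with hfgd
  set P : List String := pvOrder.filter (fun k => fgd.contains k) with hP
  set S : List String := PySem.List.sorted fgd.keys (fun k => k) false with hS
  have hSperm : S.Perm fgd.keys := PySem.List.sorted_perm _ _ _
  have hSnd : S.Nodup := hSperm.symm.nodup hkeysnd
  have hPnd : P.Nodup := List.Nodup.filter _ (by decide)
  have hPmemK : ∀ k ∈ P, k ∈ fgd.keys := by
    intro k hk
    exact (PySem.Dict.contains_iff_mem_keys fgd k).1 (List.of_mem_filter hk)
  have hPmemO : ∀ k ∈ P, k ∈ pvOrder := fun k hk => List.mem_of_mem_filter hk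
  have hFnotO : ∀ k, k ∈ S.filter (fun k => !decide (k ∈ P)) → k ∉ pvOrder := by
    intro k hk hkO
    have h1 : k ∈ S := List.mem_of_mem_filter hk
    have h2 : ¬ (k ∈ P) := by simpa using List.of_mem_filter hk
    apply h2
    rw [hP, List.mem_filter]
    refine ⟨hkO, ?_⟩
    simpa using (PySem.Dict.contains_iff_mem_keys fgd k).2 (hSperm.mem_iff.1 h1)
  apply pvSorted2_eq
  · -- permutation
    have h1 : (S.filter (fun k => decide (k ∈ P))).Perm P := by
      rw [List.perm_ext_iff_of_nodup (hSnd.filter _) hPnd]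
      intro a
      simp only [List.mem_filter, decide_eq_true_eq]
      exact ⟨fun h => h.2, fun h => ⟨hSperm.mem_iff.2 (hPmemK a h), h⟩⟩
    have h2 : ((S.filter (fun k => decide (k ∈ P)))
        ++ S.filter (fun k => !decide (k ∈ P))).Perm S :=
      List.filter_append_perm _ S
    exact ((List.Perm.append_right _ h1.symm).trans h2).trans hSperm
  · -- pairwise admissibility
    rw [List.pairwise_append]
    refine ⟨?_, ?_, ?_⟩
    · -- within the priority prefix
      have hO : pvOrder.Pairwise (fun a b => pvBef b a = false) := by decide
      exact hO.sublist List.filter_sublist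
    · -- within the sorted remainder
      have hle : S.Pairwise (fun a b : String => a ≤ b) := by
        simpa using PySem.List.sorted_pairwise fgd.keys (fun k : String => k)
      have hlt : S.Pairwise (fun a b : String => a < b) :=
        (hle.and hSnd).imp (fun h => lt_of_le_of_ne h.1 h.2)
      have hltF : (S.filter (fun k => !decide (k ∈ P))).Pairwise (fun a b : String => a < b) :=
        hlt.sublist List.filter_sublist
      refine List.Pairwise.imp_of_mem ?_ hltF
      intro a b ha hb hab
      have hra : pvRnk a = 4 := pvRnk_of_not_mem (hFnotO a ha)
      have hrb : pvRnk b = 4 := pvRnk_of_not_mem (hFnotO b hb)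
      simp only [pvBef, hra, hrb, Bool.or_eq_false_iff, Bool.and_eq_false_iff,
        Bool.not_eq_false', decide_eq_true_eq, decide_eq_false_iff_not]
      exact ⟨by omega, Or.inr (lt_asymm hab)⟩
    · -- priority keys come before all remainder keys
      intro a ha b hb
      have hra : pvRnk a < 4 := pvRnk_lt_of_mem (hPmemO a ha)
      have hrb : pvRnk b = 4 := pvRnk_of_not_mem (hFnotO b hb)
      simp only [pvBef, hrb, Bool.or_eq_false_iff, Bool.and_eq_false_iff,
        Bool.not_eq_false', decide_eq_true_eq, decide_eq_false_iff_not]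
      exact ⟨by omega, Or.inl (by omega)⟩

-- A's value as a map over the concatenated key sequence
lemma pvA_eq (fg : List (String × List (List (String × String))))
    (hpre : (fg.map Prod.fst).Nodup) :
    ordered_failure_groups_py fg
    = ((pvOrder.filter (fun k => (PySem.Dict.mk fg :
          PySem.Dict String (List (List (String × String)))).contains k))
      ++ (PySem.List.sorted (PySem.Dict.mk fg :
            PySem.Dict String (List (List (String × String)))).keys (fun k => k) false).filter
          (fun k => !decide (k ∈ pvOrder.filter (fun k => (PySem.Dict.mk fg :
              PySem.Dict String (List (List (String × String)))).contains k)))).map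
        (fun k => (k, (PySem.Dict.mk fg :
            PySem.Dict String (List (List (String × String)))).getD k [])) := by
  have hkeysnd : (PySem.Dict.mk fg :
      PySem.Dict String (List (List (String × String)))).keys.Nodup := hpre
  set fgd : PySem.Dict String (List (List (String × String))) := PySem.Dict.mk fg with hfgd
  set P : List String := pvOrder.filter (fun k => fgd.contains k) with hP
  set S : List String := PySem.List.sorted fgd.keys (fun k => k) false with hS
  have hSperm : S.Perm fgd.keys := PySem.List.sorted_perm _ _ _
  have hSnd : S.Nodup := hSperm.symm.nodup hkeysnd
  -- phase 1
  have h1 : (pvOrder.foldl (fun acc key => if fgd.contains key then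
      acc.insert key (fgd.getD key []) else acc) PySem.Dict.empty).items
      = P.map (fun k => (k, fgd.getD k [])) := by
    rw [pvFoldl_cond_insert_items fgd [] pvOrder PySem.Dict.empty (by decide)
      (fun k _ => PySem.Dict.contains_empty k)]
    simp [hP, PySem.Dict.empty]
  set d1 : PySem.Dict String (List (List (String × String))) :=
    pvOrder.foldl (fun acc key => if fgd.contains key then
      acc.insert key (fgd.getD key []) else acc) PySem.Dict.empty with hd1
  have hd1keys : d1.keys = P := by
    show d1.items.map Prod.fst = P
    rw [h1, List.map_map]
    simp [Function.comp_def]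
  have hd1cont : ∀ k, d1.contains k = decide (k ∈ P) := by
    intro k
    rw [PySem.Dict.contains_eq_decide_mem_keys, hd1keys]
  -- phase 2
  have h2 := pvFoldl_guard_insert_items fgd [] S d1 hSnd
  show (S.foldl (fun ordered key => if ordered.contains key then ordered
      else ordered.insert key (fgd.getD key [])) d1).items = _
  rw [h2, h1]
  have hfilt : (fun k => !(d1.contains k)) = (fun k => !decide (k ∈ P)) := by
    funext k; rw [hd1cont]
  rw [hfilt, List.map_append]

-- B's value as a map over its sorted key sequence
lemma pvB_eq (fg : List (String × List (List (String × String))))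
    (hpre : (fg.map Prod.fst).Nodup) :
    ordered_failure_groups_py_alt fg
    = (PySem.List.sorted2 (PySem.Dict.mk fg :
          PySem.Dict String (List (List (String × String)))).keys
        (fun k => pvRnk k) (fun k => k) false).map
        (fun k => (k, (PySem.Dict.mk fg :
            PySem.Dict String (List (List (String × String)))).getD k [])) := by
  have hkeysnd : (PySem.Dict.mk fg :
      PySem.Dict String (List (List (String × String)))).keys.Nodup := hpre
  set fgd : PySem.Dict String (List (List (String × String))) := PySem.Dict.mk fg with hfgd
  set K : List String :=
    PySem.List.sorted2 fgd.keys (fun k => pvRnk k) (fun k => k) false with hK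
  have hKnd : K.Nodup := (PySem.List.sorted2_perm fgd.keys _ _ false).symm.nodup hkeysnd
  have h := PySem.Dict.items_foldl_insert_fresh K (fun a => a)
    (fun k => fgd.getD k []) PySem.Dict.empty
    (fun a _ => PySem.Dict.contains_empty a) (by simpa using hKnd)
  show (K.foldl (fun d key => d.insert key (fgd.getD key [])) PySem.Dict.empty).items = _
  simpa using h

-- ===== VERDICT (by name: the statement is the Claim_ definition above) =====
theorem ordered_failure_groups_py_spec : Claim_equal_ordered_failure_groups_py := by
  intro fg _ hpre
  unfold Pre_ordered_failure_groups_py at hpre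
  unfold Spec_ordered_failure_groups_py
  rw [pvA_eq fg hpre, pvB_eq fg hpre, pvCore fg hpre]
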